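-- pv_equiv track=rewrite | github.com/Baoosenpai/Baoosenpai | bttuan10.py | is_valid_regex
-- ===== SOURCE A (Python) =====
-- def is_valid_regex(s):
--     n = len(s)
--     i = 0
--     prev_repeat = False
--
--     while i < n:
--         if s[i] == '\\':
--             if i + 1 >= n:
--                 return False
--             prev_repeat = False
--             i += 2
--         elif s[i] in ['*', '+']:
--             if i == 0 or prev_repeat:
--                 return False
--             prev_repeat = True
--             i += 1
--         else:
--             prev_repeat = False
--             i += 1
--     return True
-- ===== SOURCE B (Python) =====
-- def _tokens(s):
--     # list of bools (True = bare '*'/'+' token), or None on trailing backslash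
--     toks = []
--     it = iter(s)
--     for c in it:
--         if c == '\\':
--             if next(it, None) is None:
--                 return None
--             toks.append(False)
--         else:
--             toks.append(c in ('*', '+'))
--     return toks
--
-- def is_valid_regex(s):
--     toks = _tokens(s)
--     if toks is None:
--         return False
--     return all(not (a and b) for a, b in zip([True] + toks, toks))
-- ===== Notes on version B (the rewrite author's own statement) =====
-- stated objective: alternative
-- what changed: B replaces A's single index-driven while loop carrying a prev_repeat flag by a two-phase decomposition: a recursive tokenizer turning the string into a list of token kinds (escape-pair/ordinary vs bare repeat, None on trailing backslash), then an adjacent-pair check via zip that rejects a bare repeat at the start or after another bare repeat.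
import Mathlib
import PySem

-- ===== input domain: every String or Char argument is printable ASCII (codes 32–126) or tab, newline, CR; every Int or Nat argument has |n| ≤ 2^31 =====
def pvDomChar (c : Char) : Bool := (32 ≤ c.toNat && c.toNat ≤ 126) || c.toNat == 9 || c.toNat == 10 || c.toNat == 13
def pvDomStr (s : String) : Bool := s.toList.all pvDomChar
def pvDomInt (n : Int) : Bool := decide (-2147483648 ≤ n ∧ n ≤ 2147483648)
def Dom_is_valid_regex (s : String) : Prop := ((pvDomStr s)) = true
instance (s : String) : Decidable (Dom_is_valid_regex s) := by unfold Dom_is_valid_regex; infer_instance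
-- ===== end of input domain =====

-- B replaces A's single index-driven while loop (prev_repeat flag) by a two-phase
-- decomposition: tokenize into escape-pair/ordinary vs bare-repeat tokens, then an
-- adjacent-pair zip check; same behaviour, no speed claim.


-- ===== PORT A =====
-- A's while loop over index i: i advances by 1 or 2, so it is the structural loop over
-- the remaining characters; the index i is kept as a parameter for the 'i == 0' test,
-- and 's[i+1]' existing is exactly 'rest ≠ []'.
def is_valid_regex_loopA : List Char → Nat → Bool → Bool
  | [], _, _ => true
  | c :: rest, i, prev_repeat =>
    if c = '\\' then
      match rest with
      | [] => false                                   -- i + 1 >= n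
      | _ :: rest' => is_valid_regex_loopA rest' (i + 2) false
    else if c = '*' ∨ c = '+' then
      if i = 0 ∨ prev_repeat = true then false
      else is_valid_regex_loopA rest (i + 1) true
    else is_valid_regex_loopA rest (i + 1) false

def is_valid_regex (s : String) : Bool := is_valid_regex_loopA s.toList 0 false

-- ===== PORT B =====
-- _tokens: some (list of bools, true = bare repeat token), none on trailing backslash
def pvTokensB : List Char → Option (List Bool)
  | [] => some []
  | c :: rest =>
    if c = '\\' then
      match rest with
      | [] => none
      | _ :: rest' => (pvTokensB rest').map (fun ts => false :: ts)
    else (pvTokensB rest).map (fun ts => (c == '*' || c == '+') :: ts)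

def is_valid_regex_alt (s : String) : Bool :=
  match pvTokensB s.toList with
  | none => false
  | some toks => ((true :: toks).zip toks).all (fun p => !(p.1 && p.2))

-- ===== PRECONDITION & SPEC =====
def Spec_is_valid_regex (s : String) (out : Bool) : Prop := out = is_valid_regex_alt s
instance (s : String) (out : Bool) : Decidable (Spec_is_valid_regex s out) := by unfold Spec_is_valid_regex; infer_instance

-- ===== CLAIM (what is proved, stated in full; the proofs are below) =====
def Claim_equal_is_valid_regex : Prop := ∀ (s : String), Dom_is_valid_regex s → Spec_is_valid_regex s (is_valid_regex s)

-- ===== LEMMAS AND PROOFS =====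

-- B's adjacent-pair check, folded into recursive form
def pvChk (p : Bool) : List Bool → Bool
  | [] => true
  | t :: ts => (!(p && t)) && pvChk t ts

theorem pvChk_cons (p t : Bool) (ts : List Bool) :
    pvChk p (t :: ts) = ((!(p && t)) && pvChk t ts) := rfl

theorem pvChk_eq_zip (ts : List Bool) : ∀ (p : Bool),
    ((p :: ts).zip ts).all (fun q => !(q.1 && q.2)) = pvChk p ts := by
  induction ts with
  | nil => intro p; rfl
  | cons t ts ih =>
    intro p
    simp only [List.zip_cons_cons, List.all_cons, pvChk]
    rw [ih t]

theorem loopA_cons (c : Char) (rest : List Char) (i : Nat) (prev : Bool) :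
    is_valid_regex_loopA (c :: rest) i prev =
      (if c = '\\' then
        (match rest with
         | [] => false
         | _ :: rest' => is_valid_regex_loopA rest' (i + 2) false)
      else if c = '*' ∨ c = '+' then
        (if i = 0 ∨ prev = true then false
         else is_valid_regex_loopA rest (i + 1) true)
      else is_valid_regex_loopA rest (i + 1) false) := by
  cases rest <;> rfl

theorem pvTokensB_cons (c : Char) (rest : List Char) :
    pvTokensB (c :: rest) =
      (if c = '\\' then
        (match rest with
         | [] => none
         | _ :: rest' => (pvTokensB rest').map (fun ts => false :: ts))
      else (pvTokensB rest).map (fun ts => (c == '*' || c == '+') :: ts)) := by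
  cases rest <;> rfl

theorem loopA_eq_tokens : ∀ (cs : List Char) (i : Nat) (prev : Bool),
    is_valid_regex_loopA cs i prev =
      (match pvTokensB cs with
       | none => false
       | some ts => pvChk (decide (i = 0) || prev) ts) := by
  intro cs
  induction cs using pvTokensB.induct with
  | case1 => intro i prev; simp [is_valid_regex_loopA, pvTokensB, pvChk]
  | case2 => intro i prev; simp [is_valid_regex_loopA, pvTokensB]
  | case3 d rest' ih =>
    intro i prev
    simp only [is_valid_regex_loopA, pvTokensB]
    rw [ih]
    cases pvTokensB rest' with
    | none => rfl
    | some ts => simp [pvChk_cons]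
  | case4 c rest' hne ih =>
    intro i prev
    rw [loopA_cons, pvTokensB_cons]
    simp only [if_neg hne]
    cases hc : pvTokensB rest' with
    | none =>
      split_ifs with hr hz
      · rfl
      · rw [ih]; simp [hc]
      · rw [ih]; simp [hc]
    | some ts =>
      split_ifs with hr hz
      · have hq : (decide (i = 0) || prev) = true := by
          rcases hz with h | h <;> simp [h]
        have ht : (c == '*' || c == '+') = true := by
          rcases hr with h | h <;> simp [h]
        simp [pvChk_cons, hq, ht]
      · have hq : (decide (i = 0) || prev) = false := by
          push Not at hz; simp [hz.1, hz.2]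
        have ht : (c == '*' || c == '+') = true := by
          rcases hr with h | h <;> simp [h]
        rw [ih]; simp [hc, pvChk_cons, hq, ht]
      · have ht : (c == '*' || c == '+') = false := by
          push Not at hr; simp [hr.1, hr.2]
        rw [ih]; simp [hc, pvChk_cons, ht]

-- ===== VERDICT (by name: the statement is the Claim_ definition above) =====
theorem is_valid_regex_spec : Claim_equal_is_valid_regex := by
  intro s _
  unfold Spec_is_valid_regex is_valid_regex is_valid_regex_alt
  rw [loopA_eq_tokens]
  cases h : pvTokensB s.toList with
  | none => rfl
  | some ts =>
    simp only [decide_true, Bool.true_or]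
    exact (pvChk_eq_zip ts true).symm
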